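-- pv_equiv track=rewrite | github.com/itsmikethetech/Pixoo-64-Snake | Snake.py | get_coverage
-- ===== SOURCE A (Python) =====
-- PIXOO_SIZE = 64
--
-- def get_coverage(x, y, size):
--     coords = set()
--     for dx in range(size):
--         for dy in range(size):
--             px = (x + dx) % PIXOO_SIZE
--             py = (y + dy) % PIXOO_SIZE
--             coords.add((px, py))
--     return coords
-- ===== SOURCE B (Python) =====
-- PIXOO_SIZE = 64
--
-- def get_coverage(x, y, size):
--     # px and py are independent: build the two 1D wrapped index lists once
--     # (deduplicated, first occurrence order), then take their Cartesian product.
--     xs = list(dict.fromkeys((x + dx) % PIXOO_SIZE for dx in range(size)))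
--     ys = list(dict.fromkeys((y + dy) % PIXOO_SIZE for dy in range(size)))
--     return {(px, py) for px in xs for py in ys}
-- ===== Notes on version B (the rewrite author's own statement) =====
-- stated objective: faster
-- what changed: Instead of one nested quadratic loop adding every (dx,dy) pair, B builds the two deduplicated 1D wrapped coordinate lists in two linear passes and returns the set of their Cartesian product, so the work is O(size + |X|*|Y|) with |X|,|Y| <= 64 instead of O(size^2).
import Mathlib
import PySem

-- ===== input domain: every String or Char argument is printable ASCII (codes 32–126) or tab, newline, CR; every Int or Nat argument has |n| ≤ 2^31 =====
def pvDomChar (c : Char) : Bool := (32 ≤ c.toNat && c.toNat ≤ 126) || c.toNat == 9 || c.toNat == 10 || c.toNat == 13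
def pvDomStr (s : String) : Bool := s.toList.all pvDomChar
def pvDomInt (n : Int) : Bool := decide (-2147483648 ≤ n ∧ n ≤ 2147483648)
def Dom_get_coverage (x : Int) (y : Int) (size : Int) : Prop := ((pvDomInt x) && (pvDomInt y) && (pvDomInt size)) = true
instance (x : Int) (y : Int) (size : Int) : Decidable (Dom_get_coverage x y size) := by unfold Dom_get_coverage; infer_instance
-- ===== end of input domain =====

-- B replaces A's nested quadratic pair loop by two linear 1D passes (the wrapped x-
-- and y-index sets) followed by their Cartesian product (objective: faster).

-- ===== PORT A =====
-- coords = set(); for dx in range(size): for dy in range(size): coords.add(((x+dx)%64, (y+dy)%64))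
def get_coverage (x : Int) (y : Int) (size : Int) : List (Int × Int) :=
  (PySem.List.pyRange 0 size 1).foldl (fun coords dx =>
    (PySem.List.pyRange 0 size 1).foldl (fun coords dy =>
      PySem.Set.add coords (PySem.Int.mod (x + dx) 64, PySem.Int.mod (y + dy) 64)) coords)
    PySem.Set.empty

-- ===== PORT B =====
-- xs = list(dict.fromkeys((x+dx)%64 for dx in range(size))); ys likewise;
-- return {(px, py) for px in xs for py in ys}
def get_coverage_alt (x : Int) (y : Int) (size : Int) : List (Int × Int) :=
  let xs : List Int :=
    PySem.List.dedup ((PySem.List.pyRange 0 size 1).map (fun dx => PySem.Int.mod (x + dx) 64))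
  let ys : List Int :=
    PySem.List.dedup ((PySem.List.pyRange 0 size 1).map (fun dy => PySem.Int.mod (y + dy) 64))
  PySem.Set.ofList (xs.flatMap (fun px => ys.map (fun py => (px, py))))

-- ===== PRECONDITION & SPEC =====
def Spec_get_coverage (x : Int) (y : Int) (size : Int) (out : List (Int × Int)) : Prop := out = get_coverage_alt x y size
instance (x : Int) (y : Int) (size : Int) (out : List (Int × Int)) : Decidable (Spec_get_coverage x y size out) := by unfold Spec_get_coverage; infer_instance

-- ===== CLAIM (what is proved, stated in full; the proofs are below) =====
def Claim_equal_get_coverage : Prop := ∀ (x : Int) (y : Int) (size : Int), Dom_get_coverage x y size → Spec_get_coverage x y size (get_coverage x y size)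

-- ===== LEMMAS AND PROOFS =====

-- Cartesian product of two index lists, in A's discovery order.
def pvProd (X Y : List Int) : List (Int × Int) :=
  X.flatMap (fun px => Y.map (fun py => (px, py)))

theorem pvMem_prod (X Y : List Int) (p : Int × Int) :
    p ∈ pvProd X Y ↔ p.1 ∈ X ∧ p.2 ∈ Y := by
  cases p; simp [pvProd]

-- adding elements that are already present is a no-op
theorem pvFoldl_add_noop {α : Type} [BEq α] [LawfulBEq α] (l : List α) (s : PySem.Set α)
    (h : ∀ a ∈ l, a ∈ s) : l.foldl PySem.Set.add s = s := by
  induction l with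
  | nil => rfl
  | cons a l ih =>
    have ha : PySem.Set.add s a = s := by
      simp [PySem.Set.add, PySem.Set.contains, h a (by simp)]
    simp only [List.foldl_cons, ha]
    exact ih (fun b hb => h b (by simp [hb]))

-- folding a nodup list of fresh elements appends it
theorem pvFoldl_add_fresh {α : Type} [BEq α] [LawfulBEq α] (l : List α) :
    ∀ (s : PySem.Set α), l.Nodup → (∀ a ∈ l, a ∉ s) → l.foldl PySem.Set.add s = s ++ l := by
  induction l with
  | nil => intro s _ _; simp
  | cons a l ih =>
    intro s hnd hfresh
    have ha : PySem.Set.add s a = s ++ [a] := by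
      simp [PySem.Set.add, PySem.Set.contains, hfresh a (by simp)]
    simp only [List.foldl_cons, ha]
    rw [ih (s ++ [a]) hnd.of_cons]
    · simp
    · intro b hb
      simp only [List.mem_append, List.mem_singleton]
      rintro (hbs | rfl)
      · exact hfresh b (by simp [hb]) hbs
      · exact (List.nodup_cons.mp hnd).1 hb

theorem pvOfList_nodup {α : Type} [BEq α] [LawfulBEq α] (l : List α) (h : l.Nodup) :
    PySem.Set.ofList l = l := by
  have := pvFoldl_add_fresh l ([] : PySem.Set α) h (by simp)
  simpa [PySem.Set.ofList_eq_foldl] using this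

-- the inner loop over one row
theorem pvInner (px : Int) (qs : List Int) :
    ∀ (s0 : List (Int × Int)) (acc : List Int), (∀ py, (px, py) ∉ s0) →
      qs.foldl (fun s q => PySem.Set.add s (px, q)) (s0 ++ acc.map (fun py => (px, py)))
        = s0 ++ (qs.foldl PySem.Set.add acc).map (fun py => (px, py)) := by
  induction qs with
  | nil => intro s0 acc _; simp
  | cons q qs ih =>
    intro s0 acc h
    have hmem : (px, q) ∈ s0 ++ acc.map (fun py => (px, py)) ↔ q ∈ acc := by
      simp [h q]
    by_cases hq : q ∈ acc
    · have h1 : PySem.Set.add (s0 ++ acc.map (fun py => (px, py))) (px, q)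
          = s0 ++ acc.map (fun py => (px, py)) := by
        simp [PySem.Set.add, PySem.Set.contains, hmem.mpr hq]
      have h2 : PySem.Set.add acc q = acc := by
        simp [PySem.Set.add, PySem.Set.contains, hq]
      simp only [List.foldl_cons, h1, h2]
      exact ih s0 acc h
    · have h1 : PySem.Set.add (s0 ++ acc.map (fun py => (px, py))) (px, q)
          = s0 ++ (acc ++ [q]).map (fun py => (px, py)) := by
        have : (px, q) ∉ s0 ++ acc.map (fun py => (px, py)) := fun hc => hq (hmem.mp hc)
        simp [PySem.Set.add, PySem.Set.contains, this]
      have h2 : PySem.Set.add acc q = acc ++ [q] := by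
        simp [PySem.Set.add, PySem.Set.contains, hq]
      simp only [List.foldl_cons, h1, h2]
      exact ih s0 (acc ++ [q]) h

-- the outer loop: each new px appends its row
theorem pvOuter (qs : List Int) (ps : List Int) :
    ∀ (X : PySem.Set Int),
      ps.foldl (fun s px => qs.foldl (fun s q => PySem.Set.add s (px, q)) s)
          (pvProd X (PySem.Set.ofList qs))
        = pvProd (ps.foldl PySem.Set.add X) (PySem.Set.ofList qs) := by
  induction ps with
  | nil => intro X; simp
  | cons px ps ih =>
    intro X
    by_cases hx : px ∈ X
    · have hstep : qs.foldl (fun s q => PySem.Set.add s (px, q))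
          (pvProd X (PySem.Set.ofList qs)) = pvProd X (PySem.Set.ofList qs) := by
        rw [show (fun (s : List (Int × Int)) (q : Int) => PySem.Set.add s (px, q))
              = (fun s q => PySem.Set.add s ((fun py => (px, py)) q)) from rfl,
            ← List.foldl_map]
        apply pvFoldl_add_noop
        intro a ha
        rcases List.mem_map.mp ha with ⟨q, hq, rfl⟩
        exact (pvMem_prod _ _ _).mpr ⟨hx, (PySem.Set.mem_ofList qs q).mpr hq⟩
      have hadd : PySem.Set.add X px = X := by
        simp [PySem.Set.add, PySem.Set.contains, hx]
      simp only [List.foldl_cons, hstep, hadd]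
      exact ih X
    · have hstep : qs.foldl (fun s q => PySem.Set.add s (px, q))
          (pvProd X (PySem.Set.ofList qs))
            = pvProd (X ++ [px]) (PySem.Set.ofList qs) := by
        have := pvInner px qs (pvProd X (PySem.Set.ofList qs)) []
          (fun py hc => hx ((pvMem_prod _ _ _).mp hc).1)
        simp only [List.map_nil, List.append_nil] at this
        rw [this, PySem.Set.ofList_eq_foldl]
        simp [pvProd]
      have hadd : PySem.Set.add X px = X ++ [px] := by
        simp [PySem.Set.add, PySem.Set.contains, hx]
      simp only [List.foldl_cons, hstep, hadd]
      exact ih (X ++ [px])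

theorem pvNodup_prod (X Y : List Int) (hX : X.Nodup) (hY : Y.Nodup) :
    (pvProd X Y).Nodup := by
  unfold pvProd
  rw [List.nodup_flatMap]
  constructor
  · intro px _
    refine hY.map ?_
    intro a b h
    simpa using congrArg Prod.snd h
  refine hX.imp ?_
  intro a b hab p hpa hpb
  rcases List.mem_map.mp hpa with ⟨q, _, rfl⟩
  rcases List.mem_map.mp hpb with ⟨q', _, h⟩
  have hba : b = a := by simpa using congrArg Prod.fst h
  exact hab hba.symm

-- assembling both ports into a generic statement
theorem pvMain (f g : Int → Int) (R : List Int) :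
    R.foldl (fun c dx => R.foldl (fun c dy => PySem.Set.add c (f dx, g dy)) c) PySem.Set.empty
      = PySem.Set.ofList ((PySem.Set.ofList (R.map f)).flatMap
          (fun px => (PySem.Set.ofList (R.map g)).map (fun py => (px, py)))) := by
  have h := pvOuter (R.map g) (R.map f) []
  simp only [List.foldl_map] at h
  have hof : R.foldl (fun s dx => PySem.Set.add s (f dx)) [] = PySem.Set.ofList (R.map f) := by
    rw [PySem.Set.ofList_eq_foldl, List.foldl_map]
  rw [hof] at h
  have hbase : pvProd ([] : List Int) (PySem.Set.ofList (R.map g)) = PySem.Set.empty := rfl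
  rw [hbase] at h
  rw [h]
  exact (pvOfList_nodup _ (pvNodup_prod _ _ (PySem.Set.nodup_ofList _) (PySem.Set.nodup_ofList _))).symm

-- ===== VERDICT (by name: the statement is the Claim_ definition above) =====
theorem get_coverage_spec : Claim_equal_get_coverage := by
  intro x y size _
  unfold Spec_get_coverage get_coverage get_coverage_alt
  simp only [PySem.List.dedup_eq_ofList]
  exact pvMain (fun dx => PySem.Int.mod (x + dx) 64) (fun dy => PySem.Int.mod (y + dy) 64)
    (PySem.List.pyRange 0 size 1)
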